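-- pv_equiv track=rewrite | github.com/skygazer42/ForeSight | src/foresight/hierarchical.py | _node_order
-- ===== SOURCE A (Python) =====
-- def _roots(hierarchy: dict[str, tuple[str, ...]]) -> tuple[str, ...]:
--     parents = set(hierarchy)
--     children = {child for items in hierarchy.values() for child in items}
--     return tuple(sorted(parents.difference(children)))
--
-- def _node_order(hierarchy: dict[str, tuple[str, ...]]) -> list[str]:
--     order: list[str] = []
--
--     def _walk(node: str) -> None:
--         if node in order:
--             return
--         order.append(node)
--         for child in hierarchy.get(node, ()):
--             _walk(child)
--
--     for root in _roots(hierarchy):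
--         _walk(root)
--
--     return order
-- ===== SOURCE B (Python) =====
-- def _roots(hierarchy):
--     parents = set(hierarchy)
--     children = {child for items in hierarchy.values() for child in items}
--     return tuple(sorted(parents.difference(children)))
--
-- def _node_order(hierarchy):
--     order = []
--     for root in _roots(hierarchy):
--         stack = [root]
--         while stack:
--             node = stack.pop()
--             if node in order:
--                 continue
--             order.append(node)
--             stack.extend(reversed(hierarchy.get(node, ())))
--     return order
-- ===== Notes on version B (the rewrite author's own statement) =====
-- stated objective: alternative
-- what changed: A's recursive _walk is replaced by an explicit stack loop (pop a node, skip if already in order, else append it and push its children reversed), i.e. the same preorder DFS by iteration instead of recursion.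
import Mathlib
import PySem

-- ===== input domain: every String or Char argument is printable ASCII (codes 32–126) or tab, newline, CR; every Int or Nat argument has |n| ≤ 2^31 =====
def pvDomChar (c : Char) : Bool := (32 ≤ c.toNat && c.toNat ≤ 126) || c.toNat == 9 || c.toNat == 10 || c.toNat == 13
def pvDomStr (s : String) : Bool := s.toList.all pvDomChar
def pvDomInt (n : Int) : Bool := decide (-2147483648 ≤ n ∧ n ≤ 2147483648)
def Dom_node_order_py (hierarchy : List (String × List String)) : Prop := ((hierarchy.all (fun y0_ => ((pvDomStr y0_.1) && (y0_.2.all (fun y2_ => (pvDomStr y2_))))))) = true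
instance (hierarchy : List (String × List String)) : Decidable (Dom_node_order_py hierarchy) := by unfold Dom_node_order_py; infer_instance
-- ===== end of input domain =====

-- B replaces A's recursive _walk by an explicit stack loop (same preorder, same
-- dedup against the growing `order` list); objective: alternative decomposition.

-- ===== PORT A =====
-- shared helper: the dict `hierarchy` (B's Python reuses A's `_roots` and `.get` verbatim)
def pvDict (hierarchy : List (String × List String)) : PySem.Dict String (List String) :=
  PySem.Dict.ofList hierarchy

-- hierarchy.get(node, ())
def pvChildren (hierarchy : List (String × List String)) (node : String) : List String :=
  (pvDict hierarchy).getD node []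

-- _roots: sorted(set(keys) - {child for items in values for child in items})
def pvRoots (hierarchy : List (String × List String)) : List String :=
  let d := pvDict hierarchy
  let parents : PySem.Set String := PySem.Set.ofList d.keys
  let children : PySem.Set String := PySem.Set.ofList (d.values.flatMap (fun x => x))
  PySem.List.sorted (PySem.Set.diff parents children) (fun x => x) false

-- all node names that can ever be appended to `order`
def pvUniv (hierarchy : List (String × List String)) : List String :=
  (pvDict hierarchy).keys ++ (pvDict hierarchy).values.flatMap (fun x => x)

-- A's recursive _walk; the Nat argument is fuel bounding the recursion DEPTH.
-- Depth is at most |pvUniv|+1 because every recursive step appends a new node of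
-- pvUniv to `order`, so the fuel used in node_order_py never runs out (this is
-- what the equivalence proof below establishes).
def walkA (hierarchy : List (String × List String)) :
    Nat → List String → String → List String
  | 0, order, _ => order
  | f + 1, order, node =>
    if node ∈ order then order
    else (pvChildren hierarchy node).foldl (walkA hierarchy f) (order ++ [node])

def node_order_py (hierarchy : List (String × List String)) : List String :=
  (pvRoots hierarchy).foldl (walkA hierarchy ((pvUniv hierarchy).length + 1)) []

-- lemma used by loopB's termination proof: a filter by a strictly stronger
-- predicate that loses a witnessed element is strictly shorter
theorem pv_length_filter_le {α : Type} (l : List α) (p q : α → Bool)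
    (himp : ∀ x, q x = true → p x = true) :
    (l.filter q).length ≤ (l.filter p).length := by
  induction l with
  | nil => simp
  | cons b t ih =>
    simp only [List.filter_cons]
    by_cases hq : q b = true
    · rw [if_pos hq, if_pos (himp b hq)]
      simpa using ih
    · rw [if_neg hq]
      split
      · exact Nat.le_trans ih (by simp)
      · exact ih

theorem pv_length_filter_lt {α : Type} {a : α} (l : List α) (p q : α → Bool)
    (himp : ∀ x, q x = true → p x = true) (ha : a ∈ l) (hp : p a = true) (hq : q a = false) :
    (l.filter q).length < (l.filter p).length := by
  induction l with
  | nil => simp at ha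
  | cons b t ih =>
    simp only [List.filter_cons]
    rcases List.mem_cons.1 ha with rfl | hb
    · rw [if_neg (by simp [hq]), if_pos hp]
      have := pv_length_filter_le t p q himp
      simp only [List.length_cons]
      omega
    · by_cases hqb : q b = true
      · rw [if_pos hqb, if_pos (himp b hqb)]
        simpa using ih hb
      · rw [if_neg hqb]
        split
        · exact Nat.lt_succ_of_lt (ih hb)
        · exact ih hb

-- a node outside pvUniv is not a key, so it has no children (used for termination)
theorem pv_children_nil {hierarchy : List (String × List String)} {n : String}
    (hU : n ∉ pvUniv hierarchy) : pvChildren hierarchy n = [] := by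
  apply PySem.Dict.getD_of_not_contains
  rw [PySem.Dict.contains_eq_decide_mem_keys]
  simp only [decide_eq_false_iff_not]
  intro hk
  exact hU (List.mem_append_left _ hk)

-- appending a node outside pvUniv does not change the unvisited count (used for termination)
theorem pv_unv_append_not_mem (hierarchy : List (String × List String)) (order : List String)
    {n : String} (hU : n ∉ pvUniv hierarchy) :
    ((pvUniv hierarchy).filter (fun x => decide (x ∉ order ++ [n]))).length
      = ((pvUniv hierarchy).filter (fun x => decide (x ∉ order))).length := by
  congr 1
  apply List.filter_congr
  intro x hx
  have hxn : x ≠ n := fun e => hU (e ▸ hx)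
  simp [List.mem_append, hxn]

-- ===== PORT B =====
-- the `while stack:` loop; the stack is a list with its top at the head
-- (stack.pop() = head, stack.extend(reversed(children)) = children ++ rest)
def loopB (hierarchy : List (String × List String)) :
    List String → List String → List String
  | order, [] => order
  | order, node :: st =>
    if node ∈ order then loopB hierarchy order st
    else loopB hierarchy (order ++ [node]) (pvChildren hierarchy node ++ st)
termination_by order st =>
  (((pvUniv hierarchy).filter (fun x => decide (x ∉ order))).length, st.length)
decreasing_by
  · apply Prod.Lex.right
    simp
  · rename_i hnode
    by_cases hU : node ∈ pvUniv hierarchy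
    · apply Prod.Lex.left
      apply pv_length_filter_lt (a := node) _ _ _ ?_ hU (by simpa using hnode) (by simp)
      intro x hx
      simp only [decide_eq_true_eq, List.mem_append, List.mem_singleton] at hx ⊢
      exact fun hmem => hx (Or.inl hmem)
    · have hch := pv_children_nil hU
      have hfe := pv_unv_append_not_mem hierarchy order hU
      rw [hch]
      rw [List.nil_append]
      exact hfe ▸ Prod.Lex.right _ (by simp)

def node_order_py_alt (hierarchy : List (String × List String)) : List String :=
  (pvRoots hierarchy).foldl (fun order root => loopB hierarchy order [root]) []

-- ===== PRECONDITION & SPEC =====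
def Spec_node_order_py (hierarchy : List (String × List String)) (out : List String) : Prop := out = node_order_py_alt hierarchy
instance (hierarchy : List (String × List String)) (out : List String) : Decidable (Spec_node_order_py hierarchy out) := by unfold Spec_node_order_py; infer_instance

-- ===== CLAIM (what is proved, stated in full; the proofs are below) =====
def Claim_equal_node_order_py : Prop := ∀ (hierarchy : List (String × List String)), Dom_node_order_py hierarchy → Spec_node_order_py hierarchy (node_order_py hierarchy)

-- ===== LEMMAS AND PROOFS =====

-- the unvisited count: how many pvUniv entries are not yet in `order`
def pvUnv (hierarchy : List (String × List String)) (order : List String) : Nat :=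
  ((pvUniv hierarchy).filter (fun x => decide (x ∉ order))).length

theorem pv_unv_append_le (hierarchy : List (String × List String)) (order ext : List String) :
    pvUnv hierarchy (order ++ ext) ≤ pvUnv hierarchy order := by
  apply pv_length_filter_le
  intro x hx
  simp only [decide_eq_true_eq, List.mem_append] at hx ⊢
  exact fun hmem => hx (Or.inl hmem)

theorem pv_unv_append_lt (hierarchy : List (String × List String)) (order : List String)
    {n : String} (hU : n ∈ pvUniv hierarchy) (hn : n ∉ order) :
    pvUnv hierarchy (order ++ [n]) < pvUnv hierarchy order := by
  apply pv_length_filter_lt (a := n) _ _ _ ?_ hU (by simpa using hn) (by simp)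
  intro x hx
  simp only [decide_eq_true_eq, List.mem_append, List.mem_singleton] at hx ⊢
  exact fun hmem => hx (Or.inl hmem)

-- loopB only ever appends to `order`
theorem pv_loopB_prefix (hierarchy : List (String × List String)) (order st : List String) :
    ∃ ext, loopB hierarchy order st = order ++ ext := by
  fun_induction loopB hierarchy order st with
  | case1 order => exact ⟨[], by simp⟩
  | case2 order node st hmem ih => exact ih
  | case3 order node st hmem ih =>
    obtain ⟨ext, hext⟩ := ih
    exact ⟨node :: ext, by simpa using hext⟩

-- running the stack loop on a concatenation = running it in two stages
theorem pv_loopB_append (hierarchy : List (String × List String)) (order st1 st2 : List String) :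
    loopB hierarchy order (st1 ++ st2) = loopB hierarchy (loopB hierarchy order st1) st2 := by
  fun_induction loopB hierarchy order st1 with
  | case1 order => rfl
  | case2 order node st hmem ih =>
    rw [List.cons_append, loopB, if_pos hmem, ih]
  | case3 order node st hmem ih =>
    rw [List.cons_append, loopB, if_neg hmem, ← List.append_assoc, ih]

-- MAIN LEMMA: with enough fuel, folding A's recursive walk over a worklist
-- computes exactly B's stack loop started on that worklist
theorem pv_main (hierarchy : List (String × List String)) :
    ∀ f cs order, pvUnv hierarchy order < f →
      cs.foldl (walkA hierarchy f) order = loopB hierarchy order cs := by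
  intro f
  induction f with
  | zero => intro cs order h; omega
  | succ g IHf =>
    intro cs
    induction cs with
    | nil => intro order _; rw [List.foldl_nil, loopB]
    | cons c cs' IHcs =>
      intro order hord
      rw [List.foldl_cons]
      by_cases hc : c ∈ order
      · have hw : walkA hierarchy (g + 1) order c = order := by
          rw [walkA, if_pos hc]
        rw [hw, IHcs order hord, loopB, if_pos hc]
      · by_cases hU : c ∈ pvUniv hierarchy
        · have hlt : pvUnv hierarchy (order ++ [c]) < g :=
            Nat.lt_of_lt_of_le (pv_unv_append_lt hierarchy order hU hc) (Nat.lt_succ_iff.mp hord)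
          have hstep : walkA hierarchy (g + 1) order c
              = loopB hierarchy (order ++ [c]) (pvChildren hierarchy c) := by
            rw [walkA, if_neg hc]
            exact IHf (pvChildren hierarchy c) (order ++ [c]) hlt
          obtain ⟨ext, hext⟩ :=
            pv_loopB_prefix hierarchy (order ++ [c]) (pvChildren hierarchy c)
          have hord'' : pvUnv hierarchy (loopB hierarchy (order ++ [c]) (pvChildren hierarchy c)) < g + 1 := by
            rw [hext, List.append_assoc]
            exact Nat.lt_of_le_of_lt (pv_unv_append_le hierarchy order ([c] ++ ext)) hord
          rw [hstep, IHcs _ hord'', loopB, if_neg hc, pv_loopB_append]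
        · have hch := pv_children_nil hU
          have hstep : walkA hierarchy (g + 1) order c = order ++ [c] := by
            rw [walkA, if_neg hc, hch, List.foldl_nil]
          have hord' : pvUnv hierarchy (order ++ [c]) < g + 1 := by
            unfold pvUnv
            rw [pv_unv_append_not_mem hierarchy order hU]
            exact hord
          rw [hstep, IHcs _ hord', loopB, if_neg hc, hch, List.nil_append]

-- folding A's walk over the roots = folding B's per-root stack loop over them
theorem pv_foldl_roots (hierarchy : List (String × List String)) (roots : List String) :
    ∀ order, roots.foldl (walkA hierarchy ((pvUniv hierarchy).length + 1)) order
      = roots.foldl (fun o r => loopB hierarchy o [r]) order := by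
  induction roots with
  | nil => intro _; rfl
  | cons r rs ih =>
    intro order
    have hb : pvUnv hierarchy order < (pvUniv hierarchy).length + 1 :=
      Nat.lt_succ_of_le (List.length_filter_le _ _)
    have h1 : walkA hierarchy ((pvUniv hierarchy).length + 1) order r
        = loopB hierarchy order [r] := by
      have := pv_main hierarchy ((pvUniv hierarchy).length + 1) [r] order hb
      rwa [List.foldl_cons, List.foldl_nil] at this
    rw [List.foldl_cons, List.foldl_cons, h1, ih]

-- ===== VERDICT (by name: the statement is the Claim_ definition above) =====
theorem node_order_py_spec : Claim_equal_node_order_py := by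
  intro hierarchy _
  unfold Spec_node_order_py node_order_py node_order_py_alt
  exact pv_foldl_roots hierarchy (pvRoots hierarchy) []
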